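-- pv_equiv track=rewrite | github.com/rohitkumarrai7/map-scraper--MAPBOX | integrated_scraper.py | convert_scraped_data_to_dict_format
-- ===== SOURCE A (Python) =====
-- def convert_scraped_data_to_dict_format(scraped_data):
--     """Convert scraped data from list format to dictionary format for email extraction"""
--     dict_data = []
--     for row in scraped_data:
--         business_dict = {
--             'title': row[0] if len(row) > 0 else 'N/A',
--             'rating_and_reviews': row[1] if len(row) > 1 else 'N/A',
--             'address': row[2] if len(row) > 2 else 'N/A',
--             'website': row[3] if len(row) > 3 else 'N/A',
--             'phone': row[4] if len(row) > 4 else 'N/A'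
--         }
--         dict_data.append(business_dict)
--     return dict_data
-- ===== SOURCE B (Python) =====
-- def convert_scraped_data_to_dict_format(scraped_data):
--     """Convert scraped data from list format to dictionary format for email extraction"""
--     # Column-wise: build each field's column in its own pass, then recombine row-wise.
--     titles = [row[0] if len(row) > 0 else 'N/A' for row in scraped_data]
--     ratings = [row[1] if len(row) > 1 else 'N/A' for row in scraped_data]
--     addresses = [row[2] if len(row) > 2 else 'N/A' for row in scraped_data]
--     websites = [row[3] if len(row) > 3 else 'N/A' for row in scraped_data]
--     phones = [row[4] if len(row) > 4 else 'N/A' for row in scraped_data]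
--     return [{'title': t, 'rating_and_reviews': r, 'address': a, 'website': w, 'phone': p}
--             for t, r, a, w, p in zip(titles, ratings, addresses, websites, phones)]
-- ===== Notes on version B (the rewrite author's own statement) =====
-- stated objective: alternative
-- what changed: Column-wise staged passes: one pass per field builds five parallel columns, which are then zipped back together into the per-row dicts, instead of A's single row-wise pass building each dict inline.
import Mathlib
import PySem

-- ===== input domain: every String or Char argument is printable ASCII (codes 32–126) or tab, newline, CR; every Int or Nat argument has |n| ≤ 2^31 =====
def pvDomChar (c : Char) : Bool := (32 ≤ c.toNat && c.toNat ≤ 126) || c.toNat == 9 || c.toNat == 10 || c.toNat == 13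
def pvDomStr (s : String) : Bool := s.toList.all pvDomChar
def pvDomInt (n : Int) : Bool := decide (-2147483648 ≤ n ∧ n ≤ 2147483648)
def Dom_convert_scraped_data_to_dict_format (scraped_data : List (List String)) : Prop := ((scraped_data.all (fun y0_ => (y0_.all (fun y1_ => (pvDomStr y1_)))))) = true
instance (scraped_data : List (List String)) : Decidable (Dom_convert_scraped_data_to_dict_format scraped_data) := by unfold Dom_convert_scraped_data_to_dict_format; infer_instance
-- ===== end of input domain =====

-- B recombines five per-field column passes instead of A's inline row-wise dict build (alternative decomposition; same cost).

-- ===== PORT A =====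
def convert_scraped_data_to_dict_format (scraped_data : List (List String)) : List (List (String × String)) :=
  scraped_data.foldl (fun dict_data row =>
    dict_data ++ [[("title", if row.length > 0 then row.getD 0 "N/A" else "N/A"),
                   ("rating_and_reviews", if row.length > 1 then row.getD 1 "N/A" else "N/A"),
                   ("address", if row.length > 2 then row.getD 2 "N/A" else "N/A"),
                   ("website", if row.length > 3 then row.getD 3 "N/A" else "N/A"),
                   ("phone", if row.length > 4 then row.getD 4 "N/A" else "N/A")]]) []

-- ===== PORT B =====
-- one column per field (Source B's five comprehensions)
def pvColumn (i : Nat) (scraped_data : List (List String)) : List String :=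
  scraped_data.map (fun row => if row.length > i then row.getD i "N/A" else "N/A")

-- Source B's zip of the five columns into dicts
def pvZip5 : List String → List String → List String → List String → List String → List (List (String × String))
  | t :: ts, r :: rs, a :: as_, w :: ws, p :: ps =>
      [("title", t), ("rating_and_reviews", r), ("address", a), ("website", w), ("phone", p)]
        :: pvZip5 ts rs as_ ws ps
  | _, _, _, _, _ => []

def convert_scraped_data_to_dict_format_alt (scraped_data : List (List String)) : List (List (String × String)) :=
  pvZip5 (pvColumn 0 scraped_data) (pvColumn 1 scraped_data) (pvColumn 2 scraped_data)
         (pvColumn 3 scraped_data) (pvColumn 4 scraped_data)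

-- ===== PRECONDITION & SPEC =====
def Spec_convert_scraped_data_to_dict_format (scraped_data : List (List String)) (out : List (List (String × String))) : Prop := out = convert_scraped_data_to_dict_format_alt scraped_data
instance (scraped_data : List (List String)) (out : List (List (String × String))) : Decidable (Spec_convert_scraped_data_to_dict_format scraped_data out) := by unfold Spec_convert_scraped_data_to_dict_format; infer_instance

-- ===== CLAIM (what is proved, stated in full; the proofs are below) =====
def Claim_equal_convert_scraped_data_to_dict_format : Prop := ∀ (scraped_data : List (List String)), Dom_convert_scraped_data_to_dict_format scraped_data → Spec_convert_scraped_data_to_dict_format scraped_data (convert_scraped_data_to_dict_format scraped_data)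

-- ===== LEMMAS AND PROOFS =====
theorem foldl_A (scraped_data : List (List String)) (init : List (List (String × String))) :
    (scraped_data.foldl (fun dict_data row =>
      dict_data ++ [[("title", if row.length > 0 then row.getD 0 "N/A" else "N/A"),
                     ("rating_and_reviews", if row.length > 1 then row.getD 1 "N/A" else "N/A"),
                     ("address", if row.length > 2 then row.getD 2 "N/A" else "N/A"),
                     ("website", if row.length > 3 then row.getD 3 "N/A" else "N/A"),
                     ("phone", if row.length > 4 then row.getD 4 "N/A" else "N/A")]]) init)
      = init ++ convert_scraped_data_to_dict_format_alt scraped_data := by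
  induction scraped_data generalizing init with
  | nil => simp [convert_scraped_data_to_dict_format_alt, pvColumn, pvZip5]
  | cons r rs ih =>
      rw [List.foldl_cons, ih]
      simp [convert_scraped_data_to_dict_format_alt, pvColumn, pvZip5]

-- ===== VERDICT (by name: the statement is the Claim_ definition above) =====
theorem convert_scraped_data_to_dict_format_spec : Claim_equal_convert_scraped_data_to_dict_format := by
  intro scraped_data _
  show convert_scraped_data_to_dict_format scraped_data = _
  unfold convert_scraped_data_to_dict_format
  rw [foldl_A scraped_data []]
  simp
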